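-- pv_equiv track=rewrite | github.com/eliottcassidy2000/math | 04-computation/p11_beta8_v5.py | find_aut_orbits
-- ===== SOURCE A (Python) =====
-- def apply_aut(path, a, b, n):
--     """Apply affine map x -> a*x + b mod n."""
--     return tuple((a * v + b) % n for v in path)
--
-- def canon_aut_rep(path, n, QR):
--     """Return canonical orbit representative under full Aut(P_p)."""
--     best = tuple(path)
--     for a in QR:
--         for b in range(n):
--             img = apply_aut(path, a, b, n)
--             if img < best:
--                 best = img
--     return best
--
-- def find_aut_orbits(paths, n, QR):
--     """Find orbits under full automorphism group.
--
--     Returns: (reps, path_to_orbit_idx)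
--     """
--     orbit_idx = {}  # rep -> index
--     reps = []
--     path_to_orbit = {}
--
--     for p in paths:
--         pt = tuple(p)
--         rep = canon_aut_rep(p, n, QR)
--         if rep not in orbit_idx:
--             orbit_idx[rep] = len(reps)
--             reps.append(rep)
--         path_to_orbit[pt] = orbit_idx[rep]
--
--     return reps, path_to_orbit
-- ===== SOURCE B (Python) =====
-- def _canon(path, n, QR):
--     """Canonical rep: per a, the lexicographic minimum over b is attained at the
--     unique b making the first coordinate 0, so the b-loop collapses."""
--     best = tuple(path)
--     if n > 0 and path:
--         for a in QR:
--             b = (-a * path[0]) % n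
--             img = tuple((a * v + b) % n for v in path)
--             if img < best:
--                 best = img
--     return best
--
-- def find_aut_orbits(paths, n, QR):
--     reps_of = [_canon(p, n, QR) for p in paths]
--     index = {}
--     for r in reps_of:
--         if r not in index:
--             index[r] = len(index)
--     reps = list(index)
--     path_to_orbit = {tuple(p): index[r] for p, r in zip(paths, reps_of)}
--     return reps, path_to_orbit
-- ===== Notes on version B (the rewrite author's own statement) =====
-- stated objective: faster
-- what changed: The canonical representative replaces A's scan over all n translation values b by the single b = (-a*path[0]) % n that zeroes the first coordinate (the lexicographic minimum per multiplier a), and orbit grouping becomes two passes (map to reps, then index/dedup) instead of one interleaved loop.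
import Mathlib
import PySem

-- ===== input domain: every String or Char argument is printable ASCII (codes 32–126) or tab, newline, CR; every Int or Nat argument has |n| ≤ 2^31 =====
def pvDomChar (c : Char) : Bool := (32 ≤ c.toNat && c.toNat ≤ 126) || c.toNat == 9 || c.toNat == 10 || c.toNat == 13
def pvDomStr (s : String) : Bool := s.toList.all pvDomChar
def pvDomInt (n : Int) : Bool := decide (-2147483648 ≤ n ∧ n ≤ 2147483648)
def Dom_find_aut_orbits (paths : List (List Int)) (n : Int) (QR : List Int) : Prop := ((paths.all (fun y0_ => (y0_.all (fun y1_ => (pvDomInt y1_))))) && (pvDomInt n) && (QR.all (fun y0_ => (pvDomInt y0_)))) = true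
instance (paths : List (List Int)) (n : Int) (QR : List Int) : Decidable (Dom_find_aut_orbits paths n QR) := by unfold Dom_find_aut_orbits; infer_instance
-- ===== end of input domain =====

-- B replaces A's inner scan over all n shift values b by the single b that makes the
-- first coordinate 0 (the lexicographic minimum), and groups orbits in two passes.

-- ===== PORT A =====
def apply_aut (path : List Int) (a b n : Int) : List Int :=
  path.map (fun v => PySem.Int.mod (a * v + b) n)

def canon_aut_rep (path : List Int) (n : Int) (QR : List Int) : List Int :=
  QR.foldl (fun best a =>
    (PySem.List.pyRange 0 n 1).foldl (fun best b =>
      let img := apply_aut path a b n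
      if img < best then img else best) best) path

-- the body of A's 'for p in paths' loop (state: orbit_idx, reps, path_to_orbit)
def autStep (n : Int) (QR : List Int)
    (st : PySem.Dict (List Int) Int × List (List Int) × PySem.Dict (List Int) Int)
    (p : List Int) :
    PySem.Dict (List Int) Int × List (List Int) × PySem.Dict (List Int) Int :=
  let rep := canon_aut_rep p n QR
  let upd := if st.1.contains rep = false
    then (st.1.insert rep (PySem.List.len st.2.1), st.2.1 ++ [rep])
    else (st.1, st.2.1)
  -- rep is always a key of upd.1 here, so Python's orbit_idx[rep] cannot raise
  (upd.1, upd.2, st.2.2.insert p ((upd.1.get? rep).getD 0))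

def find_aut_orbits (paths : List (List Int)) (n : Int) (QR : List Int) :
    List (List Int) × (List (List Int × Int)) :=
  let st := paths.foldl (autStep n QR) (PySem.Dict.empty, [], PySem.Dict.empty)
  (st.2.1, st.2.2.items)

-- ===== PORT B =====
def canon_alt (path : List Int) (n : Int) (QR : List Int) : List Int :=
  if 0 < n ∧ path ≠ [] then
    QR.foldl (fun best a =>
      let b := PySem.Int.mod (-(a * PySem.List.pyGetD path 0 0)) n
      let img := path.map (fun v => PySem.Int.mod (a * v + b) n)
      if img < best then img else best) path
  else path

-- the body of B's index-building loop ('if r not in index: index[r] = len(index)')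
def idx_step (d : PySem.Dict (List Int) Int) (r : List Int) : PySem.Dict (List Int) Int :=
  if d.contains r = false then d.insert r ((PySem.Dict.size d : Int)) else d

def find_aut_orbits_alt (paths : List (List Int)) (n : Int) (QR : List Int) :
    List (List Int) × (List (List Int × Int)) :=
  let reps_of := paths.map (fun p => canon_alt p n QR)
  let index := reps_of.foldl idx_step PySem.Dict.empty
  let reps := index.keys
  -- every r in reps_of is a key of index, so Python's index[r] cannot raise
  let path_to_orbit := (paths.zip reps_of).foldl
    (fun (d : PySem.Dict (List Int) Int) pr => d.insert pr.1 ((index.get? pr.2).getD 0))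
    PySem.Dict.empty
  (reps, path_to_orbit.items)

-- ===== PRECONDITION & SPEC =====
def Spec_find_aut_orbits (paths : List (List Int)) (n : Int) (QR : List Int) (out : List (List Int) × (List (List Int × Int))) : Prop := out = find_aut_orbits_alt paths n QR
instance (paths : List (List Int)) (n : Int) (QR : List Int) (out : List (List Int) × (List (List Int × Int))) : Decidable (Spec_find_aut_orbits paths n QR out) := by unfold Spec_find_aut_orbits; infer_instance

-- ===== CLAIM (what is proved, stated in full; the proofs are below) =====
def Claim_equal_find_aut_orbits : Prop := ∀ (paths : List (List Int)) (n : Int) (QR : List Int), Dom_find_aut_orbits paths n QR → Spec_find_aut_orbits paths n QR (find_aut_orbits paths n QR)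

-- ===== LEMMAS AND PROOFS =====

-- a running-min fold does nothing if no element beats the accumulator
lemma foldl_min_noop (f : Int → List Int) :
    ∀ (L : List Int) (best : List Int), (∀ b ∈ L, ¬ f b < best) →
      L.foldl (fun best b => if f b < best then f b else best) best = best := by
  intro L
  induction L with
  | nil => intro best _; rfl
  | cons x L ih =>
    intro best h
    simp only [List.foldl_cons, if_neg (h x (List.mem_cons_self ..))]
    exact ih best (fun b hb => h b (List.mem_cons_of_mem _ hb))

-- a running-min fold over a list whose minimum m is attained collapses to one comparison
lemma foldl_min_collapse (f : Int → List Int) (m : List Int) :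
    ∀ (L : List Int) (best : List Int), (∃ b ∈ L, f b = m) → (∀ b ∈ L, m ≤ f b) →
      L.foldl (fun best b => if f b < best then f b else best) best =
        if m < best then m else best := by
  intro L
  induction L with
  | nil => intro best hmem _; simp at hmem
  | cons x L ih =>
    intro best hmem hle
    have hmx : m ≤ f x := hle x (List.mem_cons_self ..)
    simp only [List.foldl_cons]
    by_cases hx : ∃ b ∈ L, f b = m
    · rw [ih _ hx (fun b hb => hle b (List.mem_cons_of_mem _ hb))]
      by_cases h1 : f x < best
      · rw [if_pos h1]
        by_cases h2 : m < f x
        · rw [if_pos h2, if_pos (lt_trans h2 h1)]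
        · have hmeq : m = f x := le_antisymm hmx (not_lt.mp h2)
          rw [if_neg h2, if_pos (hmeq ▸ h1), hmeq]
      · rw [if_neg h1]
    · have hfx : f x = m := by
        rcases hmem with ⟨b, hb, hbm⟩
        rcases List.mem_cons.mp hb with h | h
        · exact h ▸ hbm
        · exact absurd ⟨b, h, hbm⟩ hx
      rw [hfx]
      apply foldl_min_noop
      intro b hb
      have hmb := hle b (List.mem_cons_of_mem _ hb)
      by_cases hmlt : m < best
      · rw [if_pos hmlt]; exact not_lt.mpr hmb
      · rw [if_neg hmlt]; exact not_lt.mpr (le_trans (not_lt.mp hmlt) hmb)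

lemma dvd_head_b0 (a p0 n : Int) : n ∣ (a * p0 + PySem.Int.mod (-(a * p0)) n) := by
  have h := PySem.Int.floordiv_mul_add_mod (-(a * p0)) n
  exact ⟨-(PySem.Int.floordiv (-(a * p0)) n), by linarith⟩

lemma head_b0_eq_zero (a p0 n : Int) :
    PySem.Int.mod (a * p0 + PySem.Int.mod (-(a * p0)) n) n = 0 :=
  (PySem.Int.mod_eq_zero_iff_dvd _ n).mpr (dvd_head_b0 a p0 n)

-- in [0, n) the shift making the head 0 is unique
lemma b_eq_b0_of_head_zero (a p0 n b : Int) (hn : 0 < n) (hb : 0 ≤ b) (hbn : b < n)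
    (h : PySem.Int.mod (a * p0 + b) n = 0) : b = PySem.Int.mod (-(a * p0)) n := by
  set b0 := PySem.Int.mod (-(a * p0)) n with hb0def
  have h1 : n ∣ (a * p0 + b) := (PySem.Int.mod_eq_zero_iff_dvd _ n).mp h
  have h2 : n ∣ (a * p0 + b0) := dvd_head_b0 a p0 n
  have h3 : n ∣ (b - b0) := by
    have := dvd_sub h1 h2
    simpa using this
  have hb0 : 0 ≤ b0 := PySem.Int.mod_nonneg _ hn
  have hb0n : b0 < n := PySem.Int.mod_lt _ hn
  rcases h3 with ⟨c, hc⟩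
  have hc0 : c = 0 := by
    rcases lt_trichotomy c 0 with h' | h' | h'
    · exfalso
      have h2 : n * c ≤ n * (-1) := mul_le_mul_of_nonneg_left (by omega) hn.le
      linarith
    · exact h'
    · exfalso
      have h2 : n * 1 ≤ n * c := mul_le_mul_of_nonneg_left (by omega) hn.le
      linarith
  subst hc0
  simp at hc
  omega

-- canonical representative: A's double loop equals B's collapsed loop
lemma canon_eq (path : List Int) (n : Int) (QR : List Int) :
    canon_aut_rep path n QR = canon_alt path n QR := by
  unfold canon_aut_rep canon_alt
  cases path with
  | nil =>
    rw [if_neg (by simp)]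
    have gnil : ∀ a : Int,
        (PySem.List.pyRange 0 n 1).foldl (fun best b =>
          let img := apply_aut [] a b n
          if img < best then img else best) ([] : List Int) = [] := by
      intro a
      exact foldl_min_noop (fun b => apply_aut [] a b n) (PySem.List.pyRange 0 n 1) []
        (fun b _ => by simp [apply_aut])
    induction QR with
    | nil => rfl
    | cons a QR ih =>
      simp only [List.foldl_cons]
      rw [gnil a]
      exact ih
  | cons p0 rest =>
    by_cases hn : 0 < n
    · rw [if_pos ⟨hn, by simp⟩]
      apply PySem.List.foldl_congr_mem
      intro best a _
      simp only [apply_aut, PySem.List.pyGetD_zero_cons]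
      set b0 := PySem.Int.mod (-(a * p0)) n with hb0def
      set m := (p0 :: rest).map (fun v => PySem.Int.mod (a * v + b0) n) with hmdef
      have hb0 : 0 ≤ b0 := PySem.Int.mod_nonneg _ hn
      have hb0n : b0 < n := PySem.Int.mod_lt _ hn
      apply foldl_min_collapse
        (fun b => (p0 :: rest).map (fun v => PySem.Int.mod (a * v + b) n)) m
        (PySem.List.pyRange 0 n 1) best
        ⟨b0, PySem.List.mem_pyRange_one.mpr ⟨hb0, hb0n⟩, rfl⟩
      intro b hb
      rw [PySem.List.mem_pyRange_one] at hb
      by_cases hbb0 : b = b0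
      · subst hbb0; exact le_refl _
      · apply le_of_lt
        simp only [List.map_cons, hmdef]
        rw [List.cons_lt_cons_iff]
        left
        have hz : PySem.Int.mod (a * p0 + b0) n = 0 := head_b0_eq_zero a p0 n
        have hge : 0 ≤ PySem.Int.mod (a * p0 + b) n := PySem.Int.mod_nonneg _ hn
        have hne : PySem.Int.mod (a * p0 + b) n ≠ 0 := by
          intro h0
          exact hbb0 (b_eq_b0_of_head_zero a p0 n b hn hb.1 hb.2 h0)
        omega
    · have hr : PySem.List.pyRange 0 n 1 = [] := PySem.List.pyRange_one_eq_nil (by omega)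
      rw [if_neg (by tauto)]
      simp only [hr, List.foldl_nil]
      exact PySem.List.foldl_ignore QR (p0 :: rest)

-- once a key has a value in the index dict, further idx_step folds keep it
lemma get?_idxfold_mono (rs : List (List Int)) :
    ∀ (d : PySem.Dict (List Int) Int) (r : List Int) (v : Int), d.get? r = some v →
      (rs.foldl idx_step d).get? r = some v := by
  induction rs with
  | nil => intro d r v h; exact h
  | cons r' rs ih =>
    intro d r v h
    simp only [List.foldl_cons]
    apply ih
    unfold idx_step
    split
    · rename_i hc
      by_cases hrr : r = r'
      · subst hrr
        rw [PySem.Dict.contains_eq_isSome_get?, h] at hc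
        simp at hc
      · rw [PySem.Dict.get?_insert_of_ne _ _ hrr]; exact h
    · exact h

lemma keys_length_eq_size (d : PySem.Dict (List Int) Int) :
    PySem.List.len d.keys = (PySem.Dict.size d : Int) := by
  simp [PySem.Dict.keys, PySem.Dict.size, PySem.List.len_eq]

-- A's single pass over paths equals B's two-pass decomposition, from any state (D, D.keys, P)
lemma afold_eq (n : Int) (QR : List Int) :
    ∀ (paths : List (List Int)) (D P : PySem.Dict (List Int) Int),
      paths.foldl (autStep n QR) (D, D.keys, P) =
        ((paths.map (fun p => canon_aut_rep p n QR)).foldl idx_step D,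
         ((paths.map (fun p => canon_aut_rep p n QR)).foldl idx_step D).keys,
         (paths.zip (paths.map (fun p => canon_aut_rep p n QR))).foldl
           (fun d pr => d.insert pr.1
             ((((paths.map (fun p => canon_aut_rep p n QR)).foldl idx_step D).get? pr.2).getD 0))
           P) := by
  intro paths
  induction paths with
  | nil => intro D P; rfl
  | cons p ps ih =>
    intro D P
    simp only [List.map_cons, List.zip_cons_cons, List.foldl_cons]
    set r := canon_aut_rep p n QR with hrdef
    have hstep : autStep n QR (D, D.keys, P) p =
        (idx_step D r, (idx_step D r).keys, P.insert p (((idx_step D r).get? r).getD 0)) := by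
      unfold autStep idx_step
      rw [← hrdef]
      by_cases hc : D.contains r = false
      · simp only [hc, if_true, keys_length_eq_size]
        rw [PySem.Dict.keys_insert_of_not_contains _ _ hc]
      · have hct : D.contains r = true := by revert hc; cases D.contains r <;> simp
        simp [hct]
    rw [hstep, ih]
    have hsome : ∃ v, (idx_step D r).get? r = some v := by
      unfold idx_step
      split
      · exact ⟨_, PySem.Dict.get?_insert_self _ _ _⟩
      · rename_i hc
        have : D.contains r = true := by revert hc; cases D.contains r <;> simp
        rw [PySem.Dict.contains_eq_isSome_get?] at this
        exact Option.isSome_iff_exists.mp this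
    rcases hsome with ⟨v, hv⟩
    rw [hv, get?_idxfold_mono _ _ _ _ hv]

-- ===== VERDICT (by name: the statement is the Claim_ definition above) =====
theorem find_aut_orbits_spec : Claim_equal_find_aut_orbits := by
  intro paths n QR _
  unfold Spec_find_aut_orbits
  simp only [find_aut_orbits, find_aut_orbits_alt]
  have hmap : paths.map (fun p => canon_alt p n QR) =
      paths.map (fun p => canon_aut_rep p n QR) :=
    List.map_congr_left (fun p _ => (canon_eq p n QR).symm)
  have h := afold_eq n QR paths PySem.Dict.empty PySem.Dict.empty
  simp only [PySem.Dict.keys_empty] at h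
  rw [hmap, h]
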